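-- pv_equiv track=rewrite | github.com/HanaBouikni/Cryptosyst-me | classic/playfair.py | trouver_position
-- ===== SOURCE A (Python) =====
-- def trouver_position(grille, lettre):
--     """
--     Trouve la position (ligne, colonne) d'une lettre dans la grille.
--     Si la lettre est J, on cherche I (convention du chiffre de Playfair).
--     """
--     if lettre == 'J':
--         lettre = 'I'
--
--     for i in range(5):
--         for j in range(5):
--             if grille[i][j] == lettre:
--                 return i, j
--
--     return -1, -1  # Ne devrait jamais arriver si la grille est correcte
-- ===== SOURCE B (Python) =====
-- def trouver_position(grille, lettre):
--     """
--     Trouve la position (ligne, colonne) d'une lettre dans la grille.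
--     Si la lettre est J, on cherche I (convention du chiffre de Playfair).
--     Recursive state machine: a single cursor (i, j) advances through the
--     5x5 window; no loops.
--     """
--     cible = 'I' if lettre == 'J' else lettre
--     return _chercher(grille, cible, 0, 0)
--
--
-- def _chercher(grille, cible, i, j):
--     if i == 5:
--         return (-1, -1)
--     if j == 5:
--         return _chercher(grille, cible, i + 1, 0)
--     if grille[i][j] == cible:
--         return (i, j)
--     return _chercher(grille, cible, i, j + 1)
-- ===== Notes on version B (the rewrite author's own statement) =====
-- stated objective: alternative
-- what changed: Replaces A's two nested for-loops with an early coordinate return by a tail-recursive state machine: a single cursor (i, j) advances cell by cell through the 5x5 window (column reset on row change), with no loop construct at all.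
import Mathlib
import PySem

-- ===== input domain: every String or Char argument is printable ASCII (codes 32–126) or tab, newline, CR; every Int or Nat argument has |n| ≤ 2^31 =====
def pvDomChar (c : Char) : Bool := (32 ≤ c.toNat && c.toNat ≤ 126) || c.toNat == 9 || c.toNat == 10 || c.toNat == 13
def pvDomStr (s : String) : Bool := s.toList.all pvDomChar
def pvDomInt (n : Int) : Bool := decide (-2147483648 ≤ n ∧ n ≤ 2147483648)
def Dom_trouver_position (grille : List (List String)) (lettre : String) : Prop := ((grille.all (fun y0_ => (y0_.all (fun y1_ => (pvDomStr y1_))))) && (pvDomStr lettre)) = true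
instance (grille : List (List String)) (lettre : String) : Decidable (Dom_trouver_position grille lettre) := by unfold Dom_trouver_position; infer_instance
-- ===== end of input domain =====

-- B replaces A's two nested index loops and early return by a tail-recursive state machine advancing a single cursor (i, j) over the 5x5 window; same cost, different decomposition.


-- ===== PORT A =====
-- inner 'for j in range(5)' loop: returns some (i, j) on the first match, none when exhausted
def pvA_inner (row : List String) (l : String) (i : Int) : List Int → Option (Int × Int)
  | [] => none
  | j :: js => if PySem.List.pyGetD row j "" = l then some (i, j) else pvA_inner row l i js

-- outer 'for i in range(5)' loop
def pvA_outer (grille : List (List String)) (l : String) : List Int → Option (Int × Int)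
  | [] => none
  | i :: is =>
    match pvA_inner (PySem.List.pyGetD grille i []) l i (PySem.List.pyRange 0 5 1) with
    | some p => some p
    | none => pvA_outer grille l is

def trouver_position (grille : List (List String)) (lettre : String) : Int × Int :=
  let l := if lettre = "J" then "I" else lettre
  match pvA_outer grille l (PySem.List.pyRange 0 5 1) with
  | some p => p
  | none => (-1, -1)

-- ===== PORT B =====
-- _chercher(grille, cible, i, j): the recursive cursor machine of Source B. The two counters are
-- the Nat cursor of the recursion (Python keeps them in 0..5); cells are read with pyGetD at
-- the Int indices exactly as Python reads grille[i][j].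
-- (the stop tests are written '5 ≤ i' / '5 ≤ j' instead of Python's '== 5': the recursion only
-- ever reaches i, j ≤ 5, where the tests agree, and the ≤ form makes termination structural)
def pvB_chercher (grille : List (List String)) (cible : String) (i j : Nat) : Int × Int :=
  if 5 ≤ i then (-1, -1)
  else if 5 ≤ j then pvB_chercher grille cible (i + 1) 0
  else if PySem.List.pyGetD (PySem.List.pyGetD grille (i : Int) []) (j : Int) "" = cible
    then ((i : Int), (j : Int))
  else pvB_chercher grille cible i (j + 1)
termination_by (5 - i, 5 - j)

def trouver_position_alt (grille : List (List String)) (lettre : String) : Int × Int :=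
  let cible := if lettre = "J" then "I" else lettre
  pvB_chercher grille cible 0 0

-- ===== PRECONDITION & SPEC =====
-- the grid scan finds a full 5x5 window from row m on
def pvFull (grille : List (List String)) (m : Nat) : Prop :=
  5 ≤ grille.length ∧ ∀ k ∈ List.range 5, m ≤ k → 5 ≤ (grille.getD k []).length

-- the letter occurs in a scanned cell reachable (from row m on) before any missing row/cell
def pvFound (grille : List (List String)) (l : String) (m : Nat) : Prop :=
  ∃ i ∈ List.range 5, m ≤ i ∧ i < grille.length ∧
    (∀ k ∈ List.range 5, m ≤ k → k < i → 5 ≤ (grille.getD k []).length) ∧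
    l ∈ (grille.getD i []).take 5

-- Pre_ is exactly the inputs on which A returns normally: either the scanned 5x5 window is
-- fully present, or the (J->I adjusted) letter sits in a cell the scan reaches before the
-- first missing row/cell; everywhere else A raises IndexError (B visits the same cells in
-- the same order, so it raises on exactly the same inputs).
def Pre_trouver_position (grille : List (List String)) (lettre : String) : Prop :=
  pvFull grille 0 ∨ pvFound grille (if lettre = "J" then "I" else lettre) 0
instance (grille : List (List String)) (lettre : String) : Decidable (Pre_trouver_position grille lettre) := by unfold Pre_trouver_position pvFull pvFound; infer_instance

def pvWitness_trouver_position : List (List String) × String :=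
  ([["A","B","C","D","E"],["F","G","H","I","K"],["L","M","N","O","P"],
    ["Q","R","S","T","U"],["V","W","X","Y","Z"]], "J")

def Spec_trouver_position (grille : List (List String)) (lettre : String) (out : Int × Int) : Prop := out = trouver_position_alt grille lettre
instance (grille : List (List String)) (lettre : String) (out : Int × Int) : Decidable (Spec_trouver_position grille lettre out) := by unfold Spec_trouver_position; infer_instance

-- ===== CLAIM (what is proved, stated in full; the proofs are below) =====
def Claim_equal_trouver_position : Prop := ∀ (grille : List (List String)) (lettre : String), Dom_trouver_position grille lettre → Pre_trouver_position grille lettre → Spec_trouver_position grille lettre (trouver_position grille lettre)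

-- ===== LEMMAS AND PROOFS =====
-- one row of B's cursor machine is A's inner scan from column j on, falling through to the next row
theorem pv_rowstep (grille : List (List String)) (cible : String) (i : Nat) (hi : i < 5) :
    ∀ (fuel j : Nat), j + fuel = 5 →
      pvB_chercher grille cible i j
        = match pvA_inner (PySem.List.pyGetD grille (i : Int) []) cible (i : Int)
              (PySem.List.pyRange (j : Int) 5 1) with
          | some p => p
          | none => pvB_chercher grille cible (i + 1) 0 := by
  intro fuel
  induction fuel with
  | zero =>
    intro j hj
    have hj5 : j = 5 := by omega
    subst hj5
    rw [show PySem.List.pyRange ((5 : Nat) : Int) 5 1 = [] from by norm_num [PySem.List.pyRange_zero]]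
    rw [pvB_chercher.eq_def]
    rw [if_neg (by omega : ¬ 5 ≤ i), if_pos (by omega : (5:Nat) ≤ 5)]
    simp only [pvA_inner]
  | succ fuel ih =>
    intro j hj
    have hjlt : j < 5 := by omega
    rw [show PySem.List.pyRange ((j : Nat) : Int) 5 1
          = (j : Int) :: PySem.List.pyRange ((j : Int) + 1) 5 1 from
        PySem.List.pyRange_one_cons (by exact_mod_cast hjlt)]
    rw [pvB_chercher.eq_def]
    rw [if_neg (by omega : ¬ 5 ≤ i), if_neg (by omega : ¬ 5 ≤ j)]
    simp only [pvA_inner]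
    by_cases hc : PySem.List.pyGetD (PySem.List.pyGetD grille (i : Int) []) (j : Int) "" = cible
    · rw [if_pos hc, if_pos hc]
    · rw [if_neg hc, if_neg hc]
      have hstep := ih (j + 1) (by omega)
      push_cast at hstep
      rw [hstep]

-- ===== VERDICT (by name: the statement is the Claim_ definition above) =====
theorem trouver_position_spec : Claim_equal_trouver_position := by
  intro grille lettre _ _
  show Spec_trouver_position _ _ _
  unfold Spec_trouver_position
  simp only [trouver_position, trouver_position_alt]
  set c := if lettre = "J" then "I" else lettre with hc
  have hR : PySem.List.pyRange 0 5 1 = [0, 1, 2, 3, 4] := by decide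
  have s0 := pv_rowstep grille c 0 (by omega) 5 0 rfl
  have s1 := pv_rowstep grille c 1 (by omega) 5 0 rfl
  have s2 := pv_rowstep grille c 2 (by omega) 5 0 rfl
  have s3 := pv_rowstep grille c 3 (by omega) 5 0 rfl
  have s4 := pv_rowstep grille c 4 (by omega) 5 0 rfl
  have s5 : pvB_chercher grille c 5 0 = (-1, -1) := by rw [pvB_chercher.eq_def]; rfl
  norm_num at s0 s1 s2 s3 s4
  rw [hR] at s0 s1 s2 s3 s4 ⊢
  rw [s0, s1, s2, s3, s4, s5]
  simp only [pvA_outer]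
  rw [hR]
  cases pvA_inner (PySem.List.pyGetD grille 0 []) c 0 [0, 1, 2, 3, 4] <;>
    cases pvA_inner (PySem.List.pyGetD grille 1 []) c 1 [0, 1, 2, 3, 4] <;>
    cases pvA_inner (PySem.List.pyGetD grille 2 []) c 2 [0, 1, 2, 3, 4] <;>
    cases pvA_inner (PySem.List.pyGetD grille 3 []) c 3 [0, 1, 2, 3, 4] <;>
    cases pvA_inner (PySem.List.pyGetD grille 4 []) c 4 [0, 1, 2, 3, 4] <;> rfl
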